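-- pv_equiv track=rewrite | github.com/Zanger67/leetcode | my-submissions/m1020.py | numEnclaves
-- ===== SOURCE A (Python) =====
-- from typing import List
--
-- def numEnclaves(grid: List[List[int]]) -> int:
--     def removeNonEnclave(row: int, col: int) -> None :
--         if not (0 <= row < len(grid)) or not (0 <= col < len(grid[0])) :
--             return
--         if not grid[row][col] :
--             return
--
--         grid[row][col] = 0
--
--         removeNonEnclave(row + 1, col)
--         removeNonEnclave(row - 1, col)
--         removeNonEnclave(row, col + 1)
--         removeNonEnclave(row, col - 1)
--
--     for i in range(len(grid)) :
--         if grid[i][0] :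
--             removeNonEnclave(i, 0)
--         if grid[i][len(grid[0]) - 1] :
--             removeNonEnclave(i, len(grid[0]) - 1)
--
--     for i in range(1, len(grid[0]) - 1) :
--         if grid[0][i] :
--             removeNonEnclave(0, i)
--         if grid[len(grid) - 1][i] :
--             removeNonEnclave(len(grid) - 1, i)
--
--
--     counter = 0
--     for row in range(1, len(grid)) :
--         for col in range(len(grid[0])) :
--             if grid[row][col] :
--                 counter += 1
--
--     return counter
-- ===== SOURCE B (Python) =====
-- from typing import List
--
-- def numEnclaves(grid: List[List[int]]) -> int:
--     rows, cols = len(grid), len(grid[0])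
--     stack = []
--     for i in range(rows):
--         if grid[i][0]:
--             stack.append((i, 0))
--         if grid[i][cols - 1]:
--             stack.append((i, cols - 1))
--     for j in range(1, cols - 1):
--         if grid[0][j]:
--             stack.append((0, j))
--         if grid[rows - 1][j]:
--             stack.append((rows - 1, j))
--     while stack:
--         r, c = stack.pop()
--         if not (0 <= r < rows and 0 <= c < cols):
--             continue
--         if not grid[r][c]:
--             continue
--         grid[r][c] = 0
--         stack.extend(((r + 1, c), (r - 1, c), (r, c + 1), (r, c - 1)))
--     counter = 0
--     for r in range(rows):
--         for c in range(cols):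
--             if grid[r][c]:
--                 counter += 1
--     return counter
-- ===== Notes on version B (the rewrite author's own statement) =====
-- stated objective: idiomatic
-- what changed: Replaces A's recursive DFS flood fill by an iterative explicit-stack flood fill whose stack is seeded up front from all border land cells, and counts the whole cleared grid instead of A's rows-1-onward scan (row 0 is always cleared).
import Mathlib
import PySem

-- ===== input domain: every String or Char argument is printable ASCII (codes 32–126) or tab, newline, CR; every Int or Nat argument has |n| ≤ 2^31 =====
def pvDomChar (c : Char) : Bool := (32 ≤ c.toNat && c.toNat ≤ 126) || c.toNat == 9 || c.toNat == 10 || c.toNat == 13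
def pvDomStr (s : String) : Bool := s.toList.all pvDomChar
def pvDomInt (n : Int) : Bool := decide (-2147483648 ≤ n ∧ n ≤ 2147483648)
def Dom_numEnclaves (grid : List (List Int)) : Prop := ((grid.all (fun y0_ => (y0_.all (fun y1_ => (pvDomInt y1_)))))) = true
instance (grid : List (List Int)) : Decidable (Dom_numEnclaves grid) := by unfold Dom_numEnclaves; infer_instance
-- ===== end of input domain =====

-- B replaces A's recursive DFS flood fill by an iterative explicit-stack flood fill seeded
-- from all border land cells, and counts the whole cleared grid (row 0 is always cleared);
-- like A, the Python B mutates `grid` in place (both zero exactly the border-connected land);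
-- the equivalence proved here is about the return value.

-- ===== PORT A =====
-- grid[r][c] read (indices already checked in range by the code) and grid[r][c] = 0 write
def pvGet (g : List (List Int)) (r c : Nat) : Int := (g.getD r []).getD c 0
def pvSet0 (g : List (List Int)) (r c : Nat) : List (List Int) := g.set r ((g.getD r []).set c 0)

-- removeNonEnclave: Python's unbounded recursion, made total with fuel; fuel is only consumed
-- when a cell is cleared, and numEnclaves passes fuel = number of grid entries ≥ number of
-- land cells, so the 0-fuel branch is never reached (proved below).
def dfsA (cols : Nat) (fuel : Nat) (g : List (List Int)) (r c : Int) : List (List Int) :=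
  if 0 ≤ r ∧ r < (g.length : Int) ∧ 0 ≤ c ∧ c < (cols : Int) then
    if pvGet g r.toNat c.toNat = 0 then g
    else
      match fuel with
      | 0 => g
      | fuel + 1 =>
        dfsA cols fuel (dfsA cols fuel (dfsA cols fuel (dfsA cols fuel
          (pvSet0 g r.toNat c.toNat) (r + 1) c) (r - 1) c) r (c + 1)) r (c - 1)
  else g
  termination_by fuel

def numEnclaves (grid : List (List Int)) : Int :=
  let cols := grid.headI.length
  let fuel := (grid.map List.length).sum
  let g1 := (List.range grid.length).foldl (fun g i =>
      let g' := if pvGet g i 0 ≠ 0 then dfsA cols fuel g (i : Int) 0 else g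
      if pvGet g' i (cols - 1) ≠ 0 then dfsA cols fuel g' (i : Int) ((cols : Int) - 1) else g') grid
  let g2 := (List.range' 1 (cols - 2)).foldl (fun g j =>
      let g' := if pvGet g 0 j ≠ 0 then dfsA cols fuel g 0 (j : Int) else g
      if pvGet g' (grid.length - 1) j ≠ 0 then dfsA cols fuel g' ((grid.length : Int) - 1) (j : Int) else g') g1
  (List.range' 1 (grid.length - 1)).foldl (fun acc r =>
      (List.range cols).foldl (fun acc c => if pvGet g2 r c ≠ 0 then acc + 1 else acc) acc) 0

-- ===== PORT B =====
-- the while-stack loop; head of the list = top of the Python stack (last appended, first popped);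
-- fuel bounds the number of iterations (4·entries + initial stack + 1 suffices, proved below)
def floodB (cols : Nat) (fuel : Nat) (g : List (List Int)) (st : List (Int × Int)) : List (List Int) :=
  match st with
  | [] => g
  | (r, c) :: st =>
    match fuel with
    | 0 => g
    | fuel + 1 =>
      if 0 ≤ r ∧ r < (g.length : Int) ∧ 0 ≤ c ∧ c < (cols : Int) then
        if pvGet g r.toNat c.toNat = 0 then floodB cols fuel g st
        else floodB cols fuel (pvSet0 g r.toNat c.toNat)
               ((r, c - 1) :: (r, c + 1) :: (r - 1, c) :: (r + 1, c) :: st)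
      else floodB cols fuel g st
  termination_by fuel

-- the two seeding loops, collected in Python append order (stack = reverse of this list)
def borderSeeds (grid : List (List Int)) (rows cols : Nat) : List (Int × Int) :=
  let s1 := (List.range rows).foldl (fun s i =>
      let s' := if pvGet grid i 0 ≠ 0 then s ++ [((i : Int), 0)] else s
      if pvGet grid i (cols - 1) ≠ 0 then s' ++ [((i : Int), (cols : Int) - 1)] else s') []
  (List.range' 1 (cols - 2)).foldl (fun s j =>
      let s' := if pvGet grid 0 j ≠ 0 then s ++ [(0, (j : Int))] else s
      if pvGet grid (rows - 1) j ≠ 0 then s' ++ [((rows : Int) - 1, (j : Int))] else s') s1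

def numEnclaves_alt (grid : List (List Int)) : Int :=
  let rows := grid.length
  let cols := grid.headI.length
  let seeds := borderSeeds grid rows cols
  let fin := floodB cols (4 * (grid.map List.length).sum + seeds.length + 1) grid seeds.reverse
  (List.range rows).foldl (fun acc r =>
      (List.range cols).foldl (fun acc c => if pvGet fin r c ≠ 0 then acc + 1 else acc) acc) 0

-- ===== PRECONDITION & SPEC =====
-- Pre_ is exactly the inputs on which the Python A returns: a nonempty grid whose first row is
-- nonempty and every row at least as long as the first (otherwise A raises IndexError on a
-- border access grid[i][0] / grid[i][len(grid[0])-1] / grid[0] before returning).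
def Pre_numEnclaves (grid : List (List Int)) : Prop :=
  grid ≠ [] ∧ 0 < grid.headI.length ∧ ∀ row ∈ grid, grid.headI.length ≤ row.length
instance (grid : List (List Int)) : Decidable (Pre_numEnclaves grid) := by
  unfold Pre_numEnclaves; infer_instance

def pvWitness_numEnclaves : List (List Int) := [[1, 1, 0], [0, 1, 0], [0, 0, 1]]

def Spec_numEnclaves (grid : List (List Int)) (out : Int) : Prop := out = numEnclaves_alt grid
instance (grid : List (List Int)) (out : Int) : Decidable (Spec_numEnclaves grid out) := by
  unfold Spec_numEnclaves; infer_instance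

-- ===== CLAIM (what is proved, stated in full; the proofs are below) =====
def Claim_equal_numEnclaves : Prop := ∀ (grid : List (List Int)), Dom_numEnclaves grid →
  Pre_numEnclaves grid → Spec_numEnclaves grid (numEnclaves grid)

-- ===== LEMMAS AND PROOFS =====

-- positions are Int pairs (row, col); 4-neighbour adjacency
def pvAdj (p q : Int × Int) : Prop :=
  (p.1 = q.1 ∧ (p.2 = q.2 + 1 ∨ p.2 + 1 = q.2)) ∨ (p.2 = q.2 ∧ (p.1 = q.1 + 1 ∨ p.1 + 1 = q.1))

-- in-bounds live cell
def pvOk (g : List (List Int)) (cols : Nat) (p : Int × Int) : Prop :=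
  0 ≤ p.1 ∧ p.1 < (g.length : Int) ∧ 0 ≤ p.2 ∧ p.2 < (cols : Int) ∧
    pvGet g p.1.toNat p.2.toNat ≠ 0

def pvStep (g : List (List Int)) (cols : Nat) (a b : Int × Int) : Prop := pvAdj a b ∧ pvOk g cols b

-- q is border-style reachable from the live cell p through live cells of g
def RG (g : List (List Int)) (cols : Nat) (p q : Int × Int) : Prop :=
  pvOk g cols p ∧ Relation.ReflTransGen (pvStep g cols) p q

def SameShape (g g' : List (List Int)) : Prop :=
  g'.length = g.length ∧ ∀ i, (g'.getD i []).length = (g.getD i []).length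

-- g' is g with exactly the cells of Z zeroed
def Cleared (g g' : List (List Int)) (Z : Int × Int → Prop) : Prop :=
  SameShape g g' ∧ ∀ r c : Nat,
    (Z (↑r, ↑c) → pvGet g' r c = 0) ∧ (¬ Z (↑r, ↑c) → pvGet g' r c = pvGet g r c)

-- Z is a union of connected components of g (closed under reachability, all live)
def GoodZ (g : List (List Int)) (cols : Nat) (Z : Int × Int → Prop) : Prop :=
  (∀ x y, Z x → RG g cols x y → Z y) ∧ (∀ x, Z x → pvOk g cols x)

def WS (g : List (List Int)) (cols : Nat) : Prop := ∀ row ∈ g, cols ≤ row.length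

def SeedReach (g : List (List Int)) (cols : Nat) (ps : List (Int × Int)) (x : Int × Int) : Prop :=
  ∃ p ∈ ps, RG g cols p x

def landN (g : List (List Int)) (cols : Nat) : Nat :=
  ((List.range g.length).map
    (fun r => ((List.range cols).filter (fun c => decide (pvGet g r c ≠ 0))).length)).sum

lemma length_pvSet0 (g : List (List Int)) (r c : Nat) : (pvSet0 g r c).length = g.length := by
  simp [pvSet0]

lemma getD_pvSet0_len (g : List (List Int)) (r c i : Nat) :
    ((pvSet0 g r c).getD i []).length = (g.getD i []).length := by
  simp only [pvSet0, List.getD_eq_getElem?_getD, List.getElem?_set]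
  split
  · next h =>
    subst h
    by_cases hr : r < g.length <;> simp [hr]
  · rfl

lemma sameShape_pvSet0 (g : List (List Int)) (r c : Nat) : SameShape g (pvSet0 g r c) := by
  exact ⟨length_pvSet0 g r c, fun i => getD_pvSet0_len g r c i⟩

lemma pvGet_pvSet0_self (g : List (List Int)) (r c : Nat)
    (hr : r < g.length) (hc : c < (g.getD r []).length) :
    pvGet (pvSet0 g r c) r c = 0 := by
  have h1 : (pvSet0 g r c).getD r [] = (g.getD r []).set c 0 := by
    simp [pvSet0, List.getD_eq_getElem?_getD, hr]
  rw [pvGet, h1]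
  rw [List.getD_eq_getElem?_getD] at hc ⊢
  rw [List.getElem?_set_self (by simpa using hc)]
  rfl

lemma pvGet_pvSet0_ne (g : List (List Int)) (r c r' c' : Nat) (h : ¬(r' = r ∧ c' = c)) :
    pvGet (pvSet0 g r c) r' c' = pvGet g r' c' := by
  by_cases hr : r' = r
  · subst hr
    have hc : c ≠ c' := fun hh => h ⟨rfl, hh.symm⟩
    by_cases hlt : r' < g.length
    · have h1 : (pvSet0 g r' c).getD r' [] = (g.getD r' []).set c 0 := by
        simp [pvSet0, List.getD_eq_getElem?_getD, hlt]
      rw [pvGet, h1, pvGet]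
      simp [List.getD_eq_getElem?_getD, List.getElem?_set_ne hc]
    · have h1 : pvSet0 g r' c = g := by
        simp [pvSet0, List.set_eq_of_length_le (by omega : g.length ≤ r')]
      rw [h1]
  · have h1 : (pvSet0 g r c).getD r' [] = g.getD r' [] := by
      simp [pvSet0, List.getD_eq_getElem?_getD, List.getElem?_set_ne (fun hh => hr hh.symm)]
    rw [pvGet, h1, pvGet]

lemma pvGetD_mem {g : List (List Int)} {r : Nat} (hr : r < g.length) : g.getD r [] ∈ g := by
  rw [List.getD_eq_getElem?_getD, List.getElem?_eq_getElem hr]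
  exact List.getElem_mem hr

-- one cell flips from live to dead, the rest of the row is unchanged
lemma pvFilterFlip {l : List Nat} {p q : Nat → Bool} {c : Nat} (hnd : l.Nodup) (hc : c ∈ l)
    (hpc : p c = true) (hqc : q c = false) (hother : ∀ x ∈ l, x ≠ c → p x = q x) :
    (l.filter q).length + 1 = (l.filter p).length := by
  induction l with
  | nil => simp at hc
  | cons a t ih =>
    by_cases hac : c = a
    · subst hac
      have hnt : c ∉ t := (List.nodup_cons.1 hnd).1
      have heq : t.filter p = t.filter q := by
        apply List.filter_congr
        intro x hx
        exact hother x (List.mem_cons_of_mem _ hx) (fun h => hnt (h ▸ hx))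
      simp [hpc, hqc, heq]
    · have hct : c ∈ t := (List.mem_cons.1 hc).resolve_left hac
      have hrec := ih (List.nodup_cons.1 hnd).2 hct
        (fun x hx hxc => hother x (List.mem_cons_of_mem _ hx) hxc)
      simp only [List.filter_cons, hother a List.mem_cons_self (fun h => hac h.symm)]
      split <;> simp_all [List.length_cons]

lemma pvSumFlip {n r : Nat} (hr : r < n) (f f' : Nat → Nat) (hrr : f' r + 1 = f r)
    (ho : ∀ x < n, x ≠ r → f' x = f x) :
    ((List.range n).map f').sum + 1 = ((List.range n).map f).sum := by
  induction n with
  | zero => omega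
  | succ m ih =>
    rw [List.range_succ]
    by_cases hrm : r = m
    · subst hrm
      have heq : (List.range r).map f' = (List.range r).map f := by
        apply List.map_congr_left
        intro x hx
        exact ho x (by simp at hx; omega) (by simp at hx; omega)
      simp [heq]
      omega
    · have := ih (by omega) (fun x hx hxr => ho x (by omega) hxr)
      simp only [List.map_append, List.sum_append, List.map_cons, List.sum_cons]
      rw [ho m (by omega) (fun h => hrm h.symm)]
      simp only [List.map_nil, List.sum_nil]
      omega

lemma ws_of_sameShape {g g' : List (List Int)} {cols : Nat} (hs : SameShape g g')
    (hw : WS g cols) : WS g' cols := by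
  intro row hrow
  obtain ⟨i, hi, rfl⟩ := List.mem_iff_getElem.1 hrow
  have h2 := hs.2 i
  have hi' : i < g.length := hs.1 ▸ hi
  rw [List.getD_eq_getElem?_getD, List.getElem?_eq_getElem hi,
      List.getD_eq_getElem?_getD, List.getElem?_eq_getElem hi'] at h2
  simp only [Option.getD_some] at h2
  rw [h2]
  exact hw _ (List.getElem_mem hi')

lemma landN_le_of_cleared {g g' : List (List Int)} {cols : Nat} {Z : Int × Int → Prop}
    (h : Cleared g g' Z) : landN g' cols ≤ landN g cols := by
  unfold landN
  rw [h.1.1]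
  apply List.sum_le_sum
  intro r _
  simp only [← List.countP_eq_length_filter]
  apply List.countP_mono_left
  intro c _ hc
  simp only [decide_eq_true_eq] at *
  intro h0
  rcases Classical.em (Z (↑r, ↑c)) with hz | hz
  · exact hc ((h.2 r c).1 hz)
  · exact hc (((h.2 r c).2 hz).trans h0)

lemma landN_pos {g : List (List Int)} {cols : Nat} {p : Int × Int} (h : pvOk g cols p) :
    1 ≤ landN g cols := by
  obtain ⟨h1, h2, h3, h4, h5⟩ := h
  set r := p.1.toNat with hrdef
  set c := p.2.toNat with hcdef
  have hr : r < g.length := by omega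
  have hc : c < cols := by omega
  unfold landN
  have hmem : ((List.range cols).filter (fun c => decide (pvGet g r c ≠ 0))).length ∈
      (List.range g.length).map
        (fun r => ((List.range cols).filter (fun c => decide (pvGet g r c ≠ 0))).length) :=
    List.mem_map.2 ⟨r, List.mem_range.2 hr, rfl⟩
  have hone : 1 ≤ ((List.range cols).filter (fun c => decide (pvGet g r c ≠ 0))).length :=
    List.length_pos_of_mem (List.mem_filter.2 ⟨List.mem_range.2 hc, by simpa using h5⟩)
  calc 1 ≤ _ := hone
    _ ≤ _ := List.single_le_sum (fun x _ => Nat.zero_le x) _ hmem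

lemma landN_pvSet0 {g : List (List Int)} {cols : Nat} {p : Int × Int}
    (hw : WS g cols) (h : pvOk g cols p) :
    landN (pvSet0 g p.1.toNat p.2.toNat) cols + 1 = landN g cols := by
  obtain ⟨h1, h2, h3, h4, h5⟩ := h
  set r := p.1.toNat with hrdef
  set c := p.2.toNat with hcdef
  have hr : r < g.length := by omega
  have hc : c < cols := by omega
  unfold landN
  rw [length_pvSet0]
  apply pvSumFlip hr
  · apply pvFilterFlip (List.nodup_range) (List.mem_range.2 hc)
    · simpa using h5
    · simp [pvGet_pvSet0_self g r c hr (lt_of_lt_of_le hc (hw _ (pvGetD_mem hr)))]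
    · intro x _ hx
      rw [pvGet_pvSet0_ne g r c r x (fun hh => hx hh.2)]
  · intro x _ hx
    congr 1
    apply List.filter_congr
    intro y _
    rw [pvGet_pvSet0_ne g r c x y (fun hh => hx hh.1)]

lemma landN_le_total {g : List (List Int)} {cols : Nat} (hw : WS g cols) :
    landN g cols ≤ (g.map List.length).sum := by
  have hlist : (List.range g.length).map (fun r => (g.getD r []).length) = g.map List.length := by
    apply List.ext_getElem
    · simp
    · intro i hi h2
      have hi' : i < g.length := by simpa using h2
      simp [List.getElem?_eq_getElem hi']
  calc landN g cols
      ≤ ((List.range g.length).map (fun r => (g.getD r []).length)).sum := by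
        apply List.sum_le_sum
        intro r hrm
        calc ((List.range cols).filter (fun c => decide (pvGet g r c ≠ 0))).length
            ≤ (List.range cols).length := List.length_filter_le _ _
          _ = cols := List.length_range
          _ ≤ _ := hw _ (pvGetD_mem (List.mem_range.1 hrm))
    _ = _ := by rw [hlist]

lemma pvAdj_symm {p q : Int × Int} (h : pvAdj p q) : pvAdj q p := by
  rcases h with ⟨h1, h2⟩ | ⟨h1, h2⟩
  · exact Or.inl ⟨h1.symm, by omega⟩
  · exact Or.inr ⟨h1.symm, by omega⟩

lemma pvAdj_iff (p q : Int × Int) :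
    pvAdj p q ↔ q = (p.1 + 1, p.2) ∨ q = (p.1 - 1, p.2) ∨ q = (p.1, p.2 + 1) ∨ q = (p.1, p.2 - 1) := by
  obtain ⟨a, b⟩ := p; obtain ⟨x, y⟩ := q
  simp [pvAdj, Prod.ext_iff]
  omega

lemma rg_ok_end {g : List (List Int)} {cols : Nat} {p q : Int × Int} (h : RG g cols p q) :
    pvOk g cols q := by
  obtain ⟨hp, hs⟩ := h
  induction hs with
  | refl => exact hp
  | tail _ h2 _ => exact h2.2

lemma rg_refl {g : List (List Int)} {cols : Nat} {p : Int × Int} (h : pvOk g cols p) :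
    RG g cols p p := ⟨h, Relation.ReflTransGen.refl⟩

lemma rg_symm {g : List (List Int)} {cols : Nat} {p q : Int × Int} (h : RG g cols p q) :
    RG g cols q p := by
  obtain ⟨hp, hs⟩ := h
  induction hs with
  | refl => exact ⟨hp, Relation.ReflTransGen.refl⟩
  | tail hs' hstep ih =>
    exact ⟨hstep.2, Relation.ReflTransGen.head
      ⟨pvAdj_symm hstep.1, rg_ok_end ⟨hp, hs'⟩⟩ ih.2⟩

lemma rg_trans {g : List (List Int)} {cols : Nat} {p q x : Int × Int} (h : RG g cols p q)
    (h2 : RG g cols q x) : RG g cols p x := ⟨h.1, h.2.trans h2.2⟩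

lemma rg_comp_eq {g : List (List Int)} {cols : Nat} {p q : Int × Int} (h : RG g cols p q) :
    ∀ x, (RG g cols p x ↔ RG g cols q x) :=
  fun x => ⟨fun h2 => rg_trans (rg_symm h) h2, fun h2 => rg_trans h h2⟩

-- value of a Cleared grid at an in-bounds Int position
lemma cleared_get {g g' : List (List Int)} {Z : Int × Int → Prop} (h : Cleared g g' Z)
    {p : Int × Int} (h1 : 0 ≤ p.1) (h2 : 0 ≤ p.2) :
    (Z p → pvGet g' p.1.toNat p.2.toNat = 0) ∧
      (¬ Z p → pvGet g' p.1.toNat p.2.toNat = pvGet g p.1.toNat p.2.toNat) := by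
  have := h.2 p.1.toNat p.2.toNat
  rwa [Int.toNat_of_nonneg h1, Int.toNat_of_nonneg h2, Prod.mk.eta] at this

lemma cleared_ok {g g' : List (List Int)} {cols : Nat} {Z : Int × Int → Prop}
    (h : Cleared g g' Z) (hz : ∀ x, Z x → pvOk g cols x) (q : Int × Int) :
    pvOk g' cols q ↔ (pvOk g cols q ∧ ¬ Z q) := by
  have hlen : g'.length = g.length := h.1.1
  constructor
  · rintro ⟨b1, b2, b3, b4, b5⟩
    rw [hlen] at b2
    have hnz : ¬ Z q := fun hq => b5 ((cleared_get h b1 b3).1 hq)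
    exact ⟨⟨b1, b2, b3, b4, fun h0 => b5 (((cleared_get h b1 b3).2 hnz).trans h0)⟩, hnz⟩
  · rintro ⟨⟨b1, b2, b3, b4, b5⟩, hnz⟩
    refine ⟨b1, by omega, b3, b4, fun h0 => b5 ?_⟩
    rw [← (cleared_get h b1 b3).2 hnz]
    exact h0

lemma cleared_ext {g g' : List (List Int)} {Z Z' : Int × Int → Prop}
    (h : Cleared g g' Z) (he : ∀ x, Z x ↔ Z' x) : Cleared g g' Z' := by
  refine ⟨h.1, fun r c => ?_⟩
  have := h.2 r c
  rw [he] at this; exact this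

lemma cleared_refl (g : List (List Int)) : Cleared g g (fun _ => False) :=
  ⟨⟨rfl, fun _ => rfl⟩, fun r c => ⟨fun h => h.elim, fun _ => rfl⟩⟩

lemma cleared_comp {g h res : List (List Int)} {Z W : Int × Int → Prop}
    (h1 : Cleared g h Z) (h2 : Cleared h res W) : Cleared g res (fun x => Z x ∨ W x) := by
  refine ⟨⟨h2.1.1.trans h1.1.1, fun i => (h2.1.2 i).trans (h1.1.2 i)⟩, fun r c => ⟨?_, ?_⟩⟩
  · rintro (hz | hw)
    · rcases Classical.em (W (↑r, ↑c)) with hw | hw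
      · exact (h2.2 r c).1 hw
      · exact ((h2.2 r c).2 hw).trans ((h1.2 r c).1 hz)
    · exact (h2.2 r c).1 hw
  · intro hzw
    exact ((h2.2 r c).2 (fun hw => hzw (Or.inr hw))).trans
      ((h1.2 r c).2 (fun hz => hzw (Or.inl hz)))

-- clearing one ok cell is a Cleared with the singleton set
lemma cleared_pvSet0 {g : List (List Int)} {cols : Nat} {p : Int × Int}
    (hw : WS g cols) (hp : pvOk g cols p) :
    Cleared g (pvSet0 g p.1.toNat p.2.toNat) (fun x => x = p) := by
  obtain ⟨h1, h2, h3, h4, h5⟩ := hp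
  refine ⟨sameShape_pvSet0 g _ _, fun r c => ⟨?_, ?_⟩⟩
  · intro hz
    have hr : r = p.1.toNat := by
      have := congrArg Prod.fst hz; simp at this; omega
    have hc : c = p.2.toNat := by
      have := congrArg Prod.snd hz; simp at this; omega
    subst hr; subst hc
    exact pvGet_pvSet0_self g _ _ (by omega)
      (lt_of_lt_of_le (by omega) (hw _ (pvGetD_mem (by omega))))
  · intro hz
    apply pvGet_pvSet0_ne
    rintro ⟨rfl, rfl⟩
    apply hz
    simp [Prod.ext_iff]
    omega

-- reachability in a grid with a closed live set Z removed
lemma cleared_rg {g h : List (List Int)} {cols : Nat} {Z : Int × Int → Prop}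
    (hc : Cleared g h Z) (hg : GoodZ g cols Z) {s : Int × Int} (hs : ¬ Z s) :
    ∀ x, (RG h cols s x ↔ RG g cols s x) := by
  intro x
  constructor
  · rintro ⟨hok, hpath⟩
    refine ⟨((cleared_ok hc hg.2 s).1 hok).1, hpath.mono ?_⟩
    rintro a b ⟨hab, hb⟩
    exact ⟨hab, ((cleared_ok hc hg.2 b).1 hb).1⟩
  · rintro ⟨hok, hpath⟩
    refine ⟨(cleared_ok hc hg.2 s).2 ⟨hok, hs⟩, ?_⟩
    induction hpath with
    | refl => exact Relation.ReflTransGen.refl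
    | tail hs' hstep ih =>
      refine Relation.ReflTransGen.tail ih ⟨hstep.1, ?_⟩
      refine (cleared_ok hc hg.2 _).2 ⟨hstep.2, fun hzc => ?_⟩
      exact hs (hg.1 _ _ hzc (rg_symm ⟨hok, Relation.ReflTransGen.tail hs' hstep⟩))

lemma cleared_rg_dead {g h : List (List Int)} {cols : Nat} {Z : Int × Int → Prop}
    (hc : Cleared g h Z) (hg : GoodZ g cols Z) {s : Int × Int} (hs : Z s) :
    ∀ x, ¬ RG h cols s x := by
  intro x hr
  exact ((cleared_ok hc hg.2 s).1 hr.1).2 hs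

-- single-cell erase: reachability decomposition at a cleared cell
lemma erase_decomp {g : List (List Int)} {cols : Nat} {p : Int × Int}
    (hw : WS g cols) (hp : pvOk g cols p) :
    ∀ x, (RG g cols p x ↔ x = p ∨ ∃ n, pvAdj p n ∧ RG (pvSet0 g p.1.toNat p.2.toNat) cols n x) := by
  intro x
  have hcl := cleared_pvSet0 hw hp
  have hokE := fun q => cleared_ok hcl (fun x hx => hx ▸ hp) q
  constructor
  · rintro ⟨hokp, hpath⟩
    induction hpath with
    | refl => exact Or.inl rfl
    | tail hs' hstep ih =>
      rename_i b c
      by_cases hcp : c = p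
      · exact Or.inl hcp
      · have hokc : pvOk (pvSet0 g p.1.toNat p.2.toNat) cols c := (hokE c).2 ⟨hstep.2, hcp⟩
        rcases ih with rfl | ⟨n, hadj, hrg⟩
        · exact Or.inr ⟨c, hstep.1, rg_refl hokc⟩
        · exact Or.inr ⟨n, hadj, ⟨hrg.1, Relation.ReflTransGen.tail hrg.2 ⟨hstep.1, hokc⟩⟩⟩
  · rintro (rfl | ⟨n, hadj, hokn, hpath⟩)
    · exact rg_refl hp
    · refine ⟨hp, Relation.ReflTransGen.head ⟨hadj, ((hokE n).1 hokn).1⟩ (hpath.mono ?_)⟩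
      rintro a b ⟨hab, hb⟩
      exact ⟨hab, ((hokE b).1 hb).1⟩

lemma erase_rg {g : List (List Int)} {cols : Nat} {p : Int × Int}
    (hw : WS g cols) (hp : pvOk g cols p) {s : Int × Int} (hs : ¬ RG g cols s p) :
    ∀ x, (RG (pvSet0 g p.1.toNat p.2.toNat) cols s x ↔ RG g cols s x) := by
  intro x
  have hcl := cleared_pvSet0 hw hp
  have hokE := fun q => cleared_ok hcl (fun x hx => hx ▸ hp) q
  constructor
  · rintro ⟨hok, hpath⟩
    refine ⟨((hokE s).1 hok).1, hpath.mono ?_⟩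
    rintro a b ⟨hab, hb⟩
    exact ⟨hab, ((hokE b).1 hb).1⟩
  · rintro ⟨hok, hpath⟩
    have hsp : s ≠ p := fun h => hs (h ▸ rg_refl hok)
    refine ⟨(hokE s).2 ⟨hok, hsp⟩, ?_⟩
    induction hpath with
    | refl => exact Relation.ReflTransGen.refl
    | tail hs' hstep ih =>
      refine Relation.ReflTransGen.tail ih ⟨hstep.1, (hokE _).2 ⟨hstep.2, fun hcp => ?_⟩⟩
      exact hs (hcp ▸ ⟨hok, Relation.ReflTransGen.tail hs' hstep⟩)


lemma rg_pvSet0_mono {g : List (List Int)} {cols : Nat} {p : Int × Int}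
    (hw : WS g cols) (hp : pvOk g cols p) {s x : Int × Int}
    (h : RG (pvSet0 g p.1.toNat p.2.toNat) cols s x) : RG g cols s x := by
  have hokE := fun q => cleared_ok (cleared_pvSet0 hw hp) (fun x hx => hx ▸ hp) q
  obtain ⟨hok, hpath⟩ := h
  refine ⟨((hokE s).1 hok).1, hpath.mono ?_⟩
  rintro a b ⟨hab, hb⟩
  exact ⟨hab, ((hokE b).1 hb).1⟩

lemma goodZ_rg (g : List (List Int)) (cols : Nat) (n : Int × Int) :
    GoodZ g cols (RG g cols n) :=
  ⟨fun _ _ hx hxy => rg_trans hx hxy, fun _ hx => rg_ok_end hx⟩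

lemma goodZ_union {g : List (List Int)} {cols : Nat} {Z : Int × Int → Prop}
    (hZ : GoodZ g cols Z) (n : Int × Int) :
    GoodZ g cols (fun x => Z x ∨ RG g cols n x) := by
  constructor
  · rintro x y (hx | hx) hxy
    · exact Or.inl (hZ.1 x y hx hxy)
    · exact Or.inr (rg_trans hx hxy)
  · rintro x (hx | hx)
    · exact hZ.2 x hx
    · exact rg_ok_end hx

-- appending one more cleared component
lemma seq_lemma {g h h' : List (List Int)} {cols : Nat} {Z : Int × Int → Prop} {n : Int × Int}
    (hZ : GoodZ g cols Z) (hc : Cleared g h Z) (hd : Cleared h h' (RG h cols n)) :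
    Cleared g h' (fun x => Z x ∨ RG g cols n x) := by
  by_cases hn : Z n
  · have hdead := cleared_rg_dead hc hZ hn
    have h'eq : Cleared h h' (fun _ => False) :=
      cleared_ext hd (fun x => ⟨fun hx => hdead x hx, False.elim⟩)
    apply cleared_ext (cleared_comp hc h'eq)
    intro x
    constructor
    · rintro (hx | hx)
      · exact Or.inl hx
      · exact hx.elim
    · rintro (hx | hx)
      · exact Or.inl hx
      · exact Or.inl (hZ.1 n x hn hx)
  · exact cleared_comp hc (cleared_ext hd (cleared_rg hc hZ hn))

lemma seedreach_nil (g : List (List Int)) (cols : Nat) (x : Int × Int) :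
    ¬ SeedReach g cols [] x := by simp [SeedReach]

lemma seedreach_cons (g : List (List Int)) (cols : Nat) (p : Int × Int)
    (ps : List (Int × Int)) (x : Int × Int) :
    SeedReach g cols (p :: ps) x ↔ RG g cols p x ∨ SeedReach g cols ps x := by
  simp [SeedReach]

lemma landN_pvSet0' {g : List (List Int)} {cols : Nat} {r c : Int}
    (hw : WS g cols) (h : pvOk g cols (r, c)) :
    landN (pvSet0 g r.toNat c.toNat) cols + 1 = landN g cols := by
  simpa using landN_pvSet0 hw h

-- main characterisation of A's recursive flood fill
lemma dfs_spec (cols : Nat) : ∀ (fuel : Nat) (g : List (List Int)) (r c : Int),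
    WS g cols → landN g cols ≤ fuel →
    Cleared g (dfsA cols fuel g r c) (RG g cols (r, c)) := by
  intro fuel
  induction fuel with
  | zero =>
    intro g r c hw hf
    rw [dfsA]
    split
    · next hb =>
      split
      · next h0 =>
        apply cleared_ext (cleared_refl g)
        intro x
        exact ⟨False.elim, fun hx => (hx.1.2.2.2.2 h0).elim⟩
      · next h0 =>
        have hok : pvOk g cols (r, c) := ⟨hb.1, hb.2.1, hb.2.2.1, hb.2.2.2, h0⟩
        exact absurd (landN_pos hok) (by omega)
    · next hb =>
      apply cleared_ext (cleared_refl g)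
      intro x
      refine ⟨False.elim, fun hx => hb ?_⟩
      exact ⟨hx.1.1, hx.1.2.1, hx.1.2.2.1, hx.1.2.2.2.1⟩
  | succ f ih =>
    intro g r c hw hf
    rw [dfsA]
    split
    · next hb =>
      split
      · next h0 =>
        apply cleared_ext (cleared_refl g)
        intro x
        exact ⟨False.elim, fun hx => (hx.1.2.2.2.2 h0).elim⟩
      · next h0 =>
        have hok : pvOk g cols (r, c) := ⟨hb.1, hb.2.1, hb.2.2.1, hb.2.2.2, h0⟩
        have hcl0 : Cleared g (pvSet0 g r.toNat c.toNat) (fun x => x = (r, c)) := by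
          simpa using cleared_pvSet0 hw hok
        set g1 := pvSet0 g r.toNat c.toNat with hg1
        have hsh1 : SameShape g g1 := hcl0.1
        have hw1 : WS g1 cols := ws_of_sameShape hsh1 hw
        have hl1 : landN g1 cols ≤ f := by
          have := landN_pvSet0' hw hok
          rw [← hg1] at this
          omega
        -- four sequential neighbour calls
        have h1 := ih g1 (r + 1) c hw1 hl1
        set a1 := dfsA cols f g1 (r + 1) c with ha1
        have hwa1 : WS a1 cols := ws_of_sameShape h1.1 hw1
        have hla1 : landN a1 cols ≤ f := le_trans (landN_le_of_cleared h1) hl1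
        have h2 := ih a1 (r - 1) c hwa1 hla1
        set a2 := dfsA cols f a1 (r - 1) c with ha2
        have c2 : Cleared g1 a2 (fun x => RG g1 cols (r + 1, c) x ∨ RG g1 cols (r - 1, c) x) :=
          seq_lemma (goodZ_rg g1 cols (r + 1, c)) h1 h2
        have hwa2 : WS a2 cols := ws_of_sameShape c2.1 hw1
        have hla2 : landN a2 cols ≤ f := le_trans (landN_le_of_cleared c2) hl1
        have h3 := ih a2 r (c + 1) hwa2 hla2
        set a3 := dfsA cols f a2 r (c + 1) with ha3
        have c3 := seq_lemma (goodZ_union (goodZ_rg g1 cols (r + 1, c)) (r - 1, c)) c2 h3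
        have hwa3 : WS a3 cols := ws_of_sameShape c3.1 hw1
        have hla3 : landN a3 cols ≤ f := le_trans (landN_le_of_cleared c3) hl1
        have h4 := ih a3 r (c - 1) hwa3 hla3
        have c4 := seq_lemma
          (goodZ_union (goodZ_union (goodZ_rg g1 cols (r + 1, c)) (r - 1, c)) (r, c + 1)) c3 h4
        have call := cleared_comp hcl0 c4
        apply cleared_ext call
        intro x
        rw [erase_decomp hw hok x]
        constructor
        · rintro (hx | hx)
          · exact Or.inl hx
          · refine Or.inr ?_
            rcases hx with ((hx | hx) | hx) | hx
            · exact ⟨(r + 1, c), by rw [pvAdj_iff]; simp, hx⟩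
            · exact ⟨(r - 1, c), by rw [pvAdj_iff]; simp, hx⟩
            · exact ⟨(r, c + 1), by rw [pvAdj_iff]; simp, hx⟩
            · exact ⟨(r, c - 1), by rw [pvAdj_iff]; simp, hx⟩
        · rintro (hx | ⟨n, hadj, hrg⟩)
          · exact Or.inl hx
          · rw [pvAdj_iff] at hadj
            simp only [] at hadj
            refine Or.inr ?_
            rcases hadj with rfl | rfl | rfl | rfl
            · exact Or.inl (Or.inl (Or.inl hrg))
            · exact Or.inl (Or.inl (Or.inr hrg))
            · exact Or.inl (Or.inr hrg)
            · exact Or.inr hrg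
    · next hb =>
      apply cleared_ext (cleared_refl g)
      intro x
      refine ⟨False.elim, fun hx => hb ?_⟩
      exact ⟨hx.1.1, hx.1.2.1, hx.1.2.2.1, hx.1.2.2.2.1⟩

-- main characterisation of B's stack flood fill
lemma flood_spec (cols : Nat) : ∀ (fuel : Nat) (g : List (List Int)) (st : List (Int × Int)),
    WS g cols → 4 * landN g cols + st.length ≤ fuel →
    Cleared g (floodB cols fuel g st) (SeedReach g cols st) := by
  intro fuel
  induction fuel with
  | zero =>
    intro g st hw hf
    match st with
    | [] =>
      rw [floodB]
      exact cleared_ext (cleared_refl g) (fun x => ⟨False.elim, fun hx => (seedreach_nil g cols x hx).elim⟩)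
    | (r, c) :: st' => simp at hf
  | succ f ih =>
    intro g st hw hf
    match st with
    | [] =>
      rw [floodB]
      exact cleared_ext (cleared_refl g) (fun x => ⟨False.elim, fun hx => (seedreach_nil g cols x hx).elim⟩)
    | (r, c) :: st' =>
      rw [floodB]
      split
      · next hb =>
        split
        · next h0 =>
          -- dead cell: skip
          have hres := ih g st' hw (by simp at hf ⊢; omega)
          apply cleared_ext hres
          intro x
          rw [seedreach_cons]
          refine ⟨Or.inr, ?_⟩
          rintro (hx | hx)
          · exact (hx.1.2.2.2.2 h0).elim
          · exact hx
        · next h0 =>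
          have hok : pvOk g cols (r, c) := ⟨hb.1, hb.2.1, hb.2.2.1, hb.2.2.2, h0⟩
          have hcl0 : Cleared g (pvSet0 g r.toNat c.toNat) (fun x => x = (r, c)) := by
            simpa using cleared_pvSet0 hw hok
          set g1 := pvSet0 g r.toNat c.toNat with hg1
          have hw1 : WS g1 cols := ws_of_sameShape hcl0.1 hw
          have hland : landN g1 cols + 1 = landN g cols := by
            have := landN_pvSet0' hw hok
            rw [← hg1] at this
            exact this
          have hres := ih g1 ((r, c - 1) :: (r, c + 1) :: (r - 1, c) :: (r + 1, c) :: st') hw1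
            (by simp at hf ⊢; omega)
          apply cleared_ext (cleared_comp hcl0 hres)
          intro x
          rw [seedreach_cons]
          simp only [seedreach_cons]
          have hdec := erase_decomp hw hok x
          rw [← hg1] at hdec
          constructor
          · rintro (rfl | hx | hx | hx | hx | hx)
            · exact Or.inl (rg_refl hok)
            · exact Or.inl (hdec.2 (Or.inr ⟨(r, c - 1), by rw [pvAdj_iff]; simp, hx⟩))
            · exact Or.inl (hdec.2 (Or.inr ⟨(r, c + 1), by rw [pvAdj_iff]; simp, hx⟩))
            · exact Or.inl (hdec.2 (Or.inr ⟨(r - 1, c), by rw [pvAdj_iff]; simp, hx⟩))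
            · exact Or.inl (hdec.2 (Or.inr ⟨(r + 1, c), by rw [pvAdj_iff]; simp, hx⟩))
            · -- a later seed s: RG g1 s x lifts to RG g s x
              obtain ⟨sd, hsd, hrg⟩ := hx
              refine Or.inr ⟨sd, hsd, ?_⟩
              have := rg_pvSet0_mono hw hok (s := sd) (x := x)
              rw [← hg1] at this
              exact this hrg
          · rintro (hx | hx)
            · rcases hdec.1 hx with rfl | ⟨n, hadj, hrg⟩
              · exact Or.inl rfl
              · rw [pvAdj_iff] at hadj
                simp only [] at hadj
                rcases hadj with rfl | rfl | rfl | rfl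
                · exact Or.inr (Or.inr (Or.inr (Or.inr (Or.inl hrg))))
                · exact Or.inr (Or.inr (Or.inr (Or.inl hrg)))
                · exact Or.inr (Or.inr (Or.inl hrg))
                · exact Or.inr (Or.inl hrg)
            · rcases hx with ⟨sd, hsd, hrg⟩
              by_cases hsp : RG g cols sd (r, c)
              · -- sd is in the popped component
                have hcomp := rg_comp_eq (rg_symm hsp) x
                rcases hdec.1 (hcomp.2 hrg) with rfl | ⟨n, hadj, hrg'⟩
                · exact Or.inl rfl
                · rw [pvAdj_iff] at hadj
                  simp only [] at hadj
                  rcases hadj with rfl | rfl | rfl | rfl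
                  · exact Or.inr (Or.inr (Or.inr (Or.inr (Or.inl hrg'))))
                  · exact Or.inr (Or.inr (Or.inr (Or.inl hrg')))
                  · exact Or.inr (Or.inr (Or.inl hrg'))
                  · exact Or.inr (Or.inl hrg')
              · have herg := erase_rg hw hok (s := sd) hsp x
                rw [← hg1] at herg
                exact Or.inr (Or.inr (Or.inr (Or.inr (Or.inr ⟨sd, hsd, herg.2 hrg⟩))))
      · next hb =>
        have hres := ih g st' hw (by simp at hf ⊢; omega)
        apply cleared_ext hres
        intro x
        rw [seedreach_cons]
        refine ⟨Or.inr, ?_⟩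
        rintro (hx | hx)
        · exact (hb ⟨hx.1.1, hx.1.2.1, hx.1.2.2.1, hx.1.2.2.2.1⟩).elim
        · exact hx


lemma seedreach_flatmap_cons (g : List (List Int)) (cols : Nat) (f : Nat → List (Int × Int))
    (i : Nat) (t : List Nat) (x : Int × Int) :
    SeedReach g cols ((i :: t).flatMap f) x ↔
      SeedReach g cols (f i) x ∨ SeedReach g cols (t.flatMap f) x := by
  simp [SeedReach, List.flatMap_cons, List.mem_append, or_and_right, exists_or]

lemma seedreach_pair (g : List (List Int)) (cols : Nat) (a b x : Int × Int) :
    SeedReach g cols [a, b] x ↔ RG g cols a x ∨ RG g cols b x := by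
  simp [SeedReach]

-- one guarded dfs call from A's border loops
lemma guard_lemma {g h : List (List Int)} {cols fuel : Nat} {Z : Int × Int → Prop}
    (a b : Int) (hZ : GoodZ g cols Z) (hc : Cleared g h Z)
    (hw : WS g cols) (hfl : landN g cols ≤ fuel) :
    Cleared g (if pvGet h a.toNat b.toNat ≠ 0 then dfsA cols fuel h a b else h)
      (fun x => Z x ∨ RG g cols (a, b) x) := by
  split
  · next hguard =>
    have hwh : WS h cols := ws_of_sameShape hc.1 hw
    have hld : landN h cols ≤ fuel := le_trans (landN_le_of_cleared hc) hfl
    exact seq_lemma hZ hc (dfs_spec cols fuel h a b hwh hld)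
  · next hguard =>
    apply cleared_ext hc
    intro x
    refine ⟨Or.inl, ?_⟩
    rintro (hx | hx)
    · exact hx
    · -- guard failed: (a,b) is dead in h, so it lies in Z, so its component is in Z
      by_cases hzab : Z (a, b)
      · exact hZ.1 _ _ hzab hx
      · exfalso
        have hokg : pvOk g cols (a, b) := hx.1
        have := (cleared_ok hc hZ.2 (a, b)).2 ⟨hokg, hzab⟩
        exact hguard this.2.2.2.2

-- A's first border loop (columns 0 and cols-1 of every row)
lemma loopA1 (cols fuel : Nat) (g : List (List Int)) (hw : WS g cols)
    (hfl : landN g cols ≤ fuel) :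
    ∀ (l : List Nat) (h : List (List Int)) (Z : Int × Int → Prop),
      GoodZ g cols Z → Cleared g h Z →
      Cleared g
        (l.foldl (fun g_ i =>
          let g' := if pvGet g_ i 0 ≠ 0 then dfsA cols fuel g_ (i : Int) 0 else g_
          if pvGet g' i (cols - 1) ≠ 0 then dfsA cols fuel g' (i : Int) ((cols : Int) - 1) else g') h)
        (fun x => Z x ∨ SeedReach g cols
          (l.flatMap (fun i : Nat => [((i : Int), 0), ((i : Int), (cols : Int) - 1)])) x) ∧
      GoodZ g cols (fun x => Z x ∨ SeedReach g cols
          (l.flatMap (fun i : Nat => [((i : Int), 0), ((i : Int), (cols : Int) - 1)])) x) := by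
  intro l
  induction l with
  | nil =>
    intro h Z hZ hc
    constructor
    · exact cleared_ext hc (fun x => ⟨Or.inl, fun hx => hx.resolve_right (by simp [SeedReach])⟩)
    · constructor
      · rintro x y (hx | hx) hxy
        · exact Or.inl (hZ.1 x y hx hxy)
        · simp [SeedReach] at hx
      · rintro x (hx | hx)
        · exact hZ.2 x hx
        · simp [SeedReach] at hx
  | cons i t ih =>
    intro h Z hZ hc
    simp only [List.foldl_cons]
    have e0 : ((i : Int)).toNat = i := by omega
    have e1 : (((cols : Int) - 1)).toNat = cols - 1 := by omega
    have e2 : ((0 : Int)).toNat = 0 := rfl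
    have g1 := guard_lemma (g := g) (h := h) (Z := Z) (i : Int) 0 hZ hc hw hfl
    rw [e0, e2] at g1
    have hZ1 := goodZ_union hZ ((i : Int), 0)
    have g2 := guard_lemma (g := g) ((i : Int)) ((cols : Int) - 1) hZ1 g1 hw hfl
    rw [e0, e1] at g2
    have hZ2 := goodZ_union hZ1 ((i : Int), (cols : Int) - 1)
    obtain ⟨hcl, hgood⟩ := ih _ _ hZ2 g2
    constructor
    · apply cleared_ext hcl
      intro x
      rw [seedreach_flatmap_cons, seedreach_pair]
      tauto
    · constructor
      · rintro x y (hx | hx) hxy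
        · exact Or.inl (hZ.1 x y hx hxy)
        · obtain ⟨p, hp, hrg⟩ := hx
          exact Or.inr ⟨p, hp, rg_trans hrg hxy⟩
      · rintro x (hx | hx)
        · exact hZ.2 x hx
        · obtain ⟨p, hp, hrg⟩ := hx
          exact rg_ok_end hrg

-- A's second border loop (rows 0 and rows-1 of the middle columns)
lemma loopA2 (cols fuel rows : Nat) (g : List (List Int)) (hw : WS g cols)
    (hfl : landN g cols ≤ fuel) :
    ∀ (l : List Nat) (h : List (List Int)) (Z : Int × Int → Prop),
      GoodZ g cols Z → Cleared g h Z →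
      Cleared g
        (l.foldl (fun g_ j =>
          let g' := if pvGet g_ 0 j ≠ 0 then dfsA cols fuel g_ 0 (j : Int) else g_
          if pvGet g' (rows - 1) j ≠ 0 then dfsA cols fuel g' ((rows : Int) - 1) (j : Int) else g') h)
        (fun x => Z x ∨ SeedReach g cols
          (l.flatMap (fun j : Nat => [(0, (j : Int)), (((rows : Int) - 1), (j : Int))])) x) ∧
      GoodZ g cols (fun x => Z x ∨ SeedReach g cols
          (l.flatMap (fun j : Nat => [(0, (j : Int)), (((rows : Int) - 1), (j : Int))])) x) := by
  intro l
  induction l with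
  | nil =>
    intro h Z hZ hc
    constructor
    · exact cleared_ext hc (fun x => ⟨Or.inl, fun hx => hx.resolve_right (by simp [SeedReach])⟩)
    · constructor
      · rintro x y (hx | hx) hxy
        · exact Or.inl (hZ.1 x y hx hxy)
        · simp [SeedReach] at hx
      · rintro x (hx | hx)
        · exact hZ.2 x hx
        · simp [SeedReach] at hx
  | cons j t ih =>
    intro h Z hZ hc
    simp only [List.foldl_cons]
    have e0 : ((j : Int)).toNat = j := by omega
    have e1 : (((rows : Int) - 1)).toNat = rows - 1 := by omega
    have e2 : ((0 : Int)).toNat = 0 := rfl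
    have g1 := guard_lemma (g := g) (h := h) (Z := Z) 0 ((j : Int)) hZ hc hw hfl
    rw [e0, e2] at g1
    have hZ1 := goodZ_union hZ (0, (j : Int))
    have g2 := guard_lemma (g := g) ((rows : Int) - 1) ((j : Int)) hZ1 g1 hw hfl
    rw [e0, e1] at g2
    have hZ2 := goodZ_union hZ1 (((rows : Int) - 1), (j : Int))
    obtain ⟨hcl, hgood⟩ := ih _ _ hZ2 g2
    constructor
    · apply cleared_ext hcl
      intro x
      rw [seedreach_flatmap_cons, seedreach_pair]
      tauto
    · constructor
      · rintro x y (hx | hx) hxy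
        · exact Or.inl (hZ.1 x y hx hxy)
        · obtain ⟨p, hp, hrg⟩ := hx
          exact Or.inr ⟨p, hp, rg_trans hrg hxy⟩
      · rintro x (hx | hx)
        · exact hZ.2 x hx
        · obtain ⟨p, hp, hrg⟩ := hx
          exact rg_ok_end hrg


lemma seedreach_append (g : List (List Int)) (cols : Nat) (l1 l2 : List (Int × Int)) (x : Int × Int) :
    SeedReach g cols (l1 ++ l2) x ↔ SeedReach g cols l1 x ∨ SeedReach g cols l2 x := by
  simp [SeedReach, List.mem_append, or_and_right, exists_or]

lemma seedreach_reverse (g : List (List Int)) (cols : Nat) (l : List (Int × Int)) (x : Int × Int) :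
    SeedReach g cols l.reverse x ↔ SeedReach g cols l x := by
  simp [SeedReach]

-- membership in B's first seeding loop
lemma mem_fold1 (grid : List (List Int)) (cols : Nat) :
    ∀ (l : List Nat) (acc : List (Int × Int)) (q : Int × Int),
      (q ∈ l.foldl (fun s i =>
          let s' := if pvGet grid i 0 ≠ 0 then s ++ [((i : Int), 0)] else s
          if pvGet grid i (cols - 1) ≠ 0 then s' ++ [((i : Int), (cols : Int) - 1)] else s') acc) ↔
      q ∈ acc ∨ ∃ i ∈ l, (q = ((i : Int), 0) ∧ pvGet grid i 0 ≠ 0) ∨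
        (q = ((i : Int), (cols : Int) - 1) ∧ pvGet grid i (cols - 1) ≠ 0) := by
  intro l
  induction l with
  | nil => intro acc q; simp
  | cons i t ih =>
    intro acc q
    rw [List.foldl_cons, ih]
    simp only [List.mem_cons]
    split_ifs <;> simp [List.mem_append] <;> aesop

-- membership in B's second seeding loop
lemma mem_fold2 (grid : List (List Int)) (rows : Nat) :
    ∀ (l : List Nat) (acc : List (Int × Int)) (q : Int × Int),
      (q ∈ l.foldl (fun s j =>
          let s' := if pvGet grid 0 j ≠ 0 then s ++ [(0, (j : Int))] else s
          if pvGet grid (rows - 1) j ≠ 0 then s' ++ [(((rows : Int) - 1), (j : Int))] else s') acc) ↔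
      q ∈ acc ∨ ∃ j ∈ l, (q = (0, (j : Int)) ∧ pvGet grid 0 j ≠ 0) ∨
        (q = (((rows : Int) - 1), (j : Int)) ∧ pvGet grid (rows - 1) j ≠ 0) := by
  intro l
  induction l with
  | nil => intro acc q; simp
  | cons j t ih =>
    intro acc q
    rw [List.foldl_cons, ih]
    simp only [List.mem_cons]
    split_ifs <;> simp [List.mem_append] <;> aesop

lemma count_fold_congr {A B : List (List Int)} (hEq : ∀ r c : Nat, pvGet A r c = pvGet B r c)
    (l cl : List Nat) (acc : Int) :
    l.foldl (fun acc r => cl.foldl (fun acc c => if pvGet A r c ≠ 0 then acc + 1 else acc) acc) acc =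
    l.foldl (fun acc r => cl.foldl (fun acc c => if pvGet B r c ≠ 0 then acc + 1 else acc) acc) acc := by
  simp only [hEq]

lemma count_fold_zero {F : List (List Int)} {cl : List Nat} (hz : ∀ c ∈ cl, pvGet F 0 c = 0) :
    ∀ acc : Int, cl.foldl (fun acc c => if pvGet F 0 c ≠ 0 then acc + 1 else acc) acc = acc := by
  induction cl with
  | nil => intro acc; rfl
  | cons c t ih =>
    intro acc
    rw [List.foldl_cons]
    rw [if_neg (by simpa using hz c List.mem_cons_self)]
    exact ih (fun x hx => hz x (List.mem_cons_of_mem _ hx)) acc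

lemma range_split (n : Nat) (h : 1 ≤ n) : List.range n = 0 :: List.range' 1 (n - 1) := by
  rw [List.range_eq_range']
  cases n with
  | zero => omega
  | succ m => rw [List.range'_succ]; simp

-- the two counting scans agree: row 0 of the cleared grid is all zero
lemma final_count {g A B : List (List Int)} {cols : Nat} {Z : Int × Int → Prop}
    (hclA : Cleared g A Z) (hclB : Cleared g B Z)
    (hrow0 : ∀ c ∈ List.range cols, pvGet B 0 c = 0) (rows1 : 1 ≤ g.length) :
    (List.range' 1 (g.length - 1)).foldl (fun acc r =>
      (List.range cols).foldl (fun acc c => if pvGet A r c ≠ 0 then acc + 1 else acc) acc) 0 =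
    (List.range g.length).foldl (fun acc r =>
      (List.range cols).foldl (fun acc c => if pvGet B r c ≠ 0 then acc + 1 else acc) acc) (0 : Int) := by
  have hEq : ∀ r c : Nat, pvGet A r c = pvGet B r c := by
    intro r c
    rcases Classical.em (Z (↑r, ↑c)) with hz | hz
    · rw [(hclA.2 r c).1 hz, (hclB.2 r c).1 hz]
    · rw [(hclA.2 r c).2 hz, (hclB.2 r c).2 hz]
  rw [count_fold_congr hEq]
  rw [range_split g.length rows1, List.foldl_cons]
  rw [count_fold_zero hrow0 0]

lemma goodZ_false (g : List (List Int)) (cols : Nat) : GoodZ g cols (fun _ => False) :=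
  ⟨fun _ _ h _ => h, fun _ h => h.elim⟩

-- ===== VERDICT (by name: the statement is the Claim_ definition above) =====
theorem numEnclaves_spec : Claim_equal_numEnclaves := by
  intro grid _ hpre
  obtain ⟨hne, hcpos, hwspre⟩ := hpre
  unfold Spec_numEnclaves numEnclaves numEnclaves_alt
  have rows1 : 1 ≤ grid.length := List.length_pos_of_ne_nil hne
  have hw : WS grid grid.headI.length := hwspre
  have hfl : landN grid grid.headI.length ≤ (grid.map List.length).sum := landN_le_total hw
  -- abbreviations for the two seed-position lists, in A's processing order
  set cols := grid.headI.length with hcols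
  set fuel := (grid.map List.length).sum with hfuel
  set s1 := (List.range grid.length).flatMap
    (fun i : Nat => [((i : Int), 0), ((i : Int), (cols : Int) - 1)]) with hs1
  set s2 := (List.range' 1 (cols - 2)).flatMap
    (fun j : Nat => [(0, (j : Int)), (((grid.length : Int) - 1), (j : Int))]) with hs2
  -- A's two border loops clear exactly the components of the border positions
  obtain ⟨hcl1, hgood1⟩ := loopA1 cols fuel grid hw hfl
    (List.range grid.length) grid (fun _ => False) (goodZ_false grid cols) (cleared_refl grid)
  obtain ⟨hcl2, _⟩ := loopA2 cols fuel grid.length grid hw hfl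
    (List.range' 1 (cols - 2)) _ _ hgood1 hcl1
  rw [← hs1] at hcl2
  rw [← hs2] at hcl2
  have hclA := cleared_ext (Z' := fun x => SeedReach grid cols (s1 ++ s2) x) hcl2
    (fun x => by simp only [seedreach_append]; tauto)
  -- B's flood fill clears exactly the components of its (live) seeds
  have hbound : 4 * landN grid cols + (borderSeeds grid grid.length cols).reverse.length ≤
      4 * fuel + (borderSeeds grid grid.length cols).length + 1 := by
    rw [List.length_reverse]
    omega
  have hflood := flood_spec cols (4 * fuel + (borderSeeds grid grid.length cols).length + 1)
    grid (borderSeeds grid grid.length cols).reverse hw hbound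
  -- B's seed list consists of exactly the live positions among A's seed positions
  have hmemBS : ∀ q : Int × Int, q ∈ borderSeeds grid grid.length cols ↔
      ((∃ i ∈ List.range grid.length,
          (q = ((i : Int), 0) ∧ pvGet grid i 0 ≠ 0) ∨
          (q = ((i : Int), (cols : Int) - 1) ∧ pvGet grid i (cols - 1) ≠ 0)) ∨
       (∃ j ∈ List.range' 1 (cols - 2),
          (q = (0, (j : Int)) ∧ pvGet grid 0 j ≠ 0) ∨
          (q = (((grid.length : Int) - 1), (j : Int)) ∧ pvGet grid (grid.length - 1) j ≠ 0))) := by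
    intro q
    unfold borderSeeds
    rw [mem_fold2 grid grid.length, mem_fold1 grid cols]
    simp
  have hSRiff : ∀ x, SeedReach grid cols (borderSeeds grid grid.length cols).reverse x ↔
      SeedReach grid cols (s1 ++ s2) x := by
    intro x
    rw [seedreach_reverse]
    constructor
    · rintro ⟨q, hq, hrg⟩
      rcases (hmemBS q).1 hq with ⟨i, hi, ⟨rfl, _⟩ | ⟨rfl, _⟩⟩ | ⟨j, hj, ⟨rfl, _⟩ | ⟨rfl, _⟩⟩
      · exact ⟨_, List.mem_append_left _ (List.mem_flatMap.2 ⟨i, hi, by simp⟩), hrg⟩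
      · exact ⟨_, List.mem_append_left _ (List.mem_flatMap.2 ⟨i, hi, by simp⟩), hrg⟩
      · exact ⟨_, List.mem_append_right _ (List.mem_flatMap.2 ⟨j, hj, by simp⟩), hrg⟩
      · exact ⟨_, List.mem_append_right _ (List.mem_flatMap.2 ⟨j, hj, by simp⟩), hrg⟩
    · rintro ⟨q, hq, hrg⟩
      have hlive := hrg.1.2.2.2.2
      refine ⟨q, (hmemBS q).2 ?_, hrg⟩
      rcases List.mem_append.1 hq with hq1 | hq2
      · obtain ⟨i, hi, hqi⟩ := List.mem_flatMap.1 hq1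
        simp only [List.mem_cons, List.not_mem_nil, or_false] at hqi
        rcases hqi with rfl | rfl
        · refine Or.inl ⟨i, hi, Or.inl ⟨rfl, ?_⟩⟩
          simpa using hlive
        · refine Or.inl ⟨i, hi, Or.inr ⟨rfl, ?_⟩⟩
          have e1 : (((cols : Int) - 1)).toNat = cols - 1 := by omega
          simpa [e1] using hlive
      · obtain ⟨j, hj, hqj⟩ := List.mem_flatMap.1 hq2
        simp only [List.mem_cons, List.not_mem_nil, or_false] at hqj
        rcases hqj with rfl | rfl
        · refine Or.inr ⟨j, hj, Or.inl ⟨rfl, ?_⟩⟩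
          simpa using hlive
        · refine Or.inr ⟨j, hj, Or.inr ⟨rfl, ?_⟩⟩
          have e1 : (((grid.length : Int) - 1)).toNat = grid.length - 1 := by omega
          simpa [e1] using hlive
  have hclB := cleared_ext (Z' := fun x => SeedReach grid cols (s1 ++ s2) x) hflood
    (fun x => by simpa using hSRiff x)
  dsimp only
  -- the whole first row belongs to the cleared set (all its live cells are seeds)
  have hZ0 : ∀ c : Nat, c < cols → pvGet grid 0 c ≠ 0 →
      SeedReach grid cols (s1 ++ s2) (((0 : Nat) : Int), (c : Int)) := by
    intro c hc hlive
    have hok : pvOk grid cols (((0 : Nat) : Int), (c : Int)) := by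
      refine ⟨by simp, by show ((0 : Nat) : Int) < (grid.length : Int); exact_mod_cast rows1,
        by simp, by show ((c : Nat) : Int) < (cols : Int); exact_mod_cast hc, by simpa using hlive⟩
    by_cases h0 : c = 0
    · refine ⟨_, List.mem_append_left _ (List.mem_flatMap.2
        ⟨0, List.mem_range.2 (by omega), ?_⟩), rg_refl hok⟩
      simp [h0]
    · by_cases h1 : c = cols - 1
      · refine ⟨_, List.mem_append_left _ (List.mem_flatMap.2
          ⟨0, List.mem_range.2 (by omega), ?_⟩), rg_refl hok⟩
        have : ((c : Int)) = (cols : Int) - 1 := by omega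
        simp [this]
      · refine ⟨_, List.mem_append_right _ (List.mem_flatMap.2
          ⟨c, List.mem_range'_1.2 ⟨by omega, by omega⟩, ?_⟩), rg_refl hok⟩
        simp
  refine final_count hclA hclB (fun c hcm => ?_) rows1
  have hc : c < cols := List.mem_range.1 hcm
  rcases Classical.em (SeedReach grid cols (s1 ++ s2) (((0 : Nat) : Int), (c : Int))) with hz | hz
  · exact (hclB.2 0 c).1 hz
  · rw [(hclB.2 0 c).2 hz]
    by_contra hlive
    exact hz (hZ0 c hc hlive)
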